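-- pv_equiv track=rewrite | github.com/RamananVr/Leetcodepython | tree/2659_make_array_empty.py | countOperationsToEmptyArraySimulation
-- ===== SOURCE A (Python) =====
-- from typing import List
--
-- def countOperationsToEmptyArraySimulation(nums: List[int]) -> int:
--     """
--     Alternative approach using simulation with priority queue.
--     """
--     import heapq
--     from collections import deque
--
--     n = len(nums)
--     if n == 0:
--         return 0
--
--     # Create priority queue with (value, index)
--     pq = [(nums[i], i) for i in range(n) if nums[i] > 0]
--     heapq.heapify(pq)
--
--     operations = 0
--     current_pos = 0
--     active_indices = set(range(n))
--
--     while pq: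
--         value, target_index = heapq.heappop(pq)
--
--         # Skip if this index was already processed
--         if target_index not in active_indices:
--             continue
--
--         # Find distance to target index
--         indices_list = sorted(active_indices)
--         current_idx_in_list = indices_list.index(current_pos) if current_pos in active_indices else 0
--         target_idx_in_list = indices_list.index(target_index)
--
--         # Calculate circular distance
--         if target_idx_in_list >= current_idx_in_list:
--             distance = target_idx_in_list - current_idx_in_list
--         else:
--             distance = len(indices_list) - current_idx_in_list + target_idx_in_list
--
--         operations += distance + value
--         current_pos = target_index
--         active_indices.remove(target_index)
--
--     return operations
-- ===== SOURCE B (Python) =====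
-- from typing import List
-- import bisect
--
-- def countOperationsToEmptyArraySimulation(nums: List[int]) -> int:
--     # One pass over the positive entries in (value, index) order; instead of
--     # re-sorting the surviving index set each step, keep a sorted list of
--     # already-removed indices and count those below the target with bisect.
--     ops = 0
--     removed = []
--     for value, idx in sorted((v, i) for i, v in enumerate(nums) if v > 0):
--         ops += idx - bisect.bisect_left(removed, idx) + value
--         bisect.insort(removed, idx)
--     return ops
-- ===== Notes on version B (the rewrite author's own statement) =====
-- stated objective: faster
-- what changed: Replaces the heap plus per-step full re-sort of the active index set (and circular-distance bookkeeping) with a single pass over the positive (value,index) pairs in sorted order, maintaining a sorted list of removed indices and counting those below each target via bisect.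
import Mathlib
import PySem

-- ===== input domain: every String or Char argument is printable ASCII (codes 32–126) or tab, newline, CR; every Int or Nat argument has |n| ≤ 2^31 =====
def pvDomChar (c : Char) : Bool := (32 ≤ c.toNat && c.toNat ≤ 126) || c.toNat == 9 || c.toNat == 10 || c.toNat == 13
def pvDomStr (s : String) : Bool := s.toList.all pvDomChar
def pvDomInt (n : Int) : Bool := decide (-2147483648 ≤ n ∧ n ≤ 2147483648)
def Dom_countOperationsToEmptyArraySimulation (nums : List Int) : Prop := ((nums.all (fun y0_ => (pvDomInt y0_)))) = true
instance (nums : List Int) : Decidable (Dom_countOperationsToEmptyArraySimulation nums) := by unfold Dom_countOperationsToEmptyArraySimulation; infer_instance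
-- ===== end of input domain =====

-- B replaces A's heap + per-step re-sort of the active index set with one sorted pass over the
-- positive (value,index) pairs and a sorted list of removed indices queried by bisect (measured faster).


-- ===== PORT A =====
-- the while-pq loop of A; the heap pops all its (value, index) pairs in ascending tuple order
-- (nothing is pushed after heapify), so the popped sequence is the sorted pair list fed in here.
def pvALoop : List (Int × Int) → Int → Int → PySem.Set Int → Int
  | [], operations, _, _ => operations
  | (value, targetIndex) :: pq, operations, currentPos, active =>
    if !(PySem.Set.contains active targetIndex) then
      -- target already processed: continue
      pvALoop pq operations currentPos active
    else
      let indicesList := PySem.List.sorted active (fun x => x)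
      -- list.index raises on a missing element; both lookups are guarded (the element is present),
      -- so the total `.getD 0` form is exact here
      let currentIdxInList : Int :=
        if PySem.Set.contains active currentPos then ((PySem.List.index? indicesList currentPos).getD 0 : Nat) else 0
      let targetIdxInList : Int := ((PySem.List.index? indicesList targetIndex).getD 0 : Nat)
      let distance : Int :=
        if targetIdxInList ≥ currentIdxInList then targetIdxInList - currentIdxInList
        else PySem.List.len indicesList - currentIdxInList + targetIdxInList
      pvALoop pq (operations + (distance + value)) targetIndex (PySem.Set.discard active targetIndex)

def countOperationsToEmptyArraySimulation (nums : List Int) : Int :=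
  let n : Int := PySem.List.len nums
  if n == 0 then 0
  else
    -- pq = [(nums[i], i) for i in range(n) if nums[i] > 0]; heapify + repeated heappop = ascending tuple order
    let pq := PySem.List.sorted2
      (((PySem.List.pyRange 0 n 1).filter (fun i => decide (0 < PySem.List.pyGetD nums i 0))).map
        (fun i => (PySem.List.pyGetD nums i 0, i)))
      (fun p => p.1) (fun p => p.2)
    pvALoop pq 0 0 (PySem.Set.ofList (PySem.List.pyRange 0 n 1))

-- ===== PORT B =====
-- bisect.insort(xs, x): insert x into the sorted list xs after any equal elements (exact)
def pvInsort (xs : List Int) (x : Int) : List Int :=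
  match xs with
  | [] => [x]
  | a :: t => if x < a then x :: a :: t else a :: pvInsort t x

def countOperationsToEmptyArraySimulation_alt (nums : List Int) : Int :=
  let sortedPairs := PySem.List.sorted2
    (((PySem.List.enumerate nums).filter (fun p => decide (0 < p.2))).map (fun p => (p.2, p.1)))
    (fun p => p.1) (fun p => p.2)
  (sortedPairs.foldl
    (fun s p => (s.1 + p.2 - (PySem.List.bisectLeft s.2 p.2 : Int) + p.1, pvInsort s.2 p.2))
    (0, ([] : List Int))).1

-- ===== PRECONDITION & SPEC =====
def Spec_countOperationsToEmptyArraySimulation (nums : List Int) (out : Int) : Prop := out = countOperationsToEmptyArraySimulation_alt nums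
instance (nums : List Int) (out : Int) : Decidable (Spec_countOperationsToEmptyArraySimulation nums out) := by unfold Spec_countOperationsToEmptyArraySimulation; infer_instance

-- ===== CLAIM (what is proved, stated in full; the proofs are below) =====
def Claim_equal_countOperationsToEmptyArraySimulation : Prop := ∀ (nums : List Int), Dom_countOperationsToEmptyArraySimulation nums → Spec_countOperationsToEmptyArraySimulation nums (countOperationsToEmptyArraySimulation nums)

-- ===== LEMMAS AND PROOFS =====

lemma mem_pvInsort (xs : List Int) (x y : Int) : y ∈ pvInsort xs x ↔ y = x ∨ y ∈ xs := by
  induction xs with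
  | nil => simp [pvInsort]
  | cons a t ih =>
    simp only [pvInsort]
    split_ifs with h
    · simp only [List.mem_cons]
    · simp only [List.mem_cons, ih]
      tauto

lemma pairwise_pvInsort (xs : List Int) (x : Int) (hp : xs.Pairwise (· < ·)) (hx : x ∉ xs) :
    (pvInsort xs x).Pairwise (· < ·) := by
  induction xs with
  | nil => simp [pvInsort]
  | cons a t ih =>
    rw [List.pairwise_cons] at hp
    simp only [List.mem_cons, not_or] at hx
    simp only [pvInsort]
    split_ifs with h
    · refine List.pairwise_cons.mpr ⟨?_, List.pairwise_cons.mpr hp⟩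
      intro b hb
      rcases List.mem_cons.mp hb with rfl | hb
      · exact h
      · exact lt_trans h (hp.1 b hb)
    · have hax : a < x := lt_of_le_of_ne (not_lt.mp h) (Ne.symm hx.1)
      refine List.pairwise_cons.mpr ⟨?_, ih hp.2 hx.2⟩
      intro b hb
      rcases (mem_pvInsort t x b).mp hb with rfl | hb
      · exact hax
      · exact hp.1 b hb

lemma index?_of_pairwise_lt (l : List Int) (x : Int) (hp : l.Pairwise (· < ·)) (hx : x ∈ l) :
    PySem.List.index? l x = some (l.countP (fun y => decide (y < x))) := by
  induction l with
  | nil => simp at hx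
  | cons a t ih =>
    rw [List.pairwise_cons] at hp
    by_cases hax : a = x
    · subst hax
      rw [PySem.List.index?_cons_self]
      have h1 : t.countP (fun y => decide (y < a)) = 0 := by
        rw [List.countP_eq_zero]
        intro b hb
        simpa using not_lt.mpr (le_of_lt (hp.1 b hb))
      simp [h1]
    · have hxt : x ∈ t := by
        rcases List.mem_cons.mp hx with rfl | h
        · exact absurd rfl hax
        · exact h
      rw [PySem.List.index?_cons_of_ne t hax, ih hp.2 hxt]
      have hax' : a < x := hp.1 x hxt
      simp [hax']

lemma bisectLeft_eq_countP (r : List Int) (x : Int) (hr : r.Pairwise (· < ·)) :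
    PySem.List.bisectLeft r x = r.countP (fun y => decide (y < x)) := by
  obtain ⟨hk, hlt, hge⟩ := PySem.List.bisectLeft_spec r x (hr.imp le_of_lt)
  set k := PySem.List.bisectLeft r x with hkdef
  conv_rhs => rw [← List.take_append_drop k r]
  rw [List.countP_append]
  have h1 : (r.take k).countP (fun y => decide (y < x)) = (r.take k).length := by
    rw [List.countP_eq_length]
    intro b hb
    obtain ⟨i, hi, rfl⟩ := List.getElem_of_mem hb
    rw [List.getElem_take]
    have hik : i < k := lt_of_lt_of_le hi (by simp)
    exact decide_eq_true (hlt i (lt_of_lt_of_le hik hk) hik)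
  have h2 : (r.drop k).countP (fun y => decide (y < x)) = 0 := by
    rw [List.countP_eq_zero]
    intro b hb
    obtain ⟨i, hi, rfl⟩ := List.getElem_of_mem hb
    have hikn : k + i < r.length := by
      have := hi; simp [List.length_drop] at this; omega
    rw [List.getElem_drop]
    simpa using not_lt.mpr (hge (k + i) hikn (by omega))
  rw [h1, h2, List.length_take, min_eq_left hk]
  omega

-- the canonical strictly increasing list of still-active indices
def pvCan (n : Int) (r : List Int) : List Int :=
  (PySem.List.pyRange 0 n 1).filter (fun j => decide (j ∉ r))

lemma pairwise_pvCan (n : Int) (r : List Int) : (pvCan n r).Pairwise (· < ·) :=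
  (PySem.List.pairwise_lt_pyRange_one 0 n).filter _

lemma mem_pvCan (n : Int) (r : List Int) (j : Int) :
    j ∈ pvCan n r ↔ (0 ≤ j ∧ j < n) ∧ j ∉ r := by
  simp [pvCan, List.mem_filter, PySem.List.mem_pyRange_one]

lemma countP_pvCan (n t : Int) (r : List Int)
    (hr : r.Pairwise (· < ·)) (hmem : ∀ x ∈ r, 0 ≤ x) (h0 : 0 ≤ t) (htn : t < n) :
    ((pvCan n r).countP (fun y => decide (y < t)) : Int) = t - r.countP (fun y => decide (y < t)) := by
  have hndr : r.Nodup := hr.imp ne_of_lt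
  rw [pvCan, List.countP_filter, PySem.List.pyRange_one_append 0 t n h0 (le_of_lt htn),
    List.countP_append]
  have h2 : (PySem.List.pyRange t n).countP
      (fun a => decide (a < t) && decide (a ∉ r)) = 0 := by
    rw [List.countP_eq_zero]
    intro j hj
    have : t ≤ j := ((PySem.List.mem_pyRange_one).mp hj).1
    simp [not_lt.mpr this]
  have h1 : (PySem.List.pyRange 0 t).countP (fun a => decide (a < t) && decide (a ∉ r)) =
      (PySem.List.pyRange 0 t).countP (fun a => decide (a ∉ r)) := by
    apply List.countP_congr
    intro j hj
    have : j < t := ((PySem.List.mem_pyRange_one).mp hj).2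
    simp [this]
  have hsum : (PySem.List.pyRange 0 t).countP (fun a => decide (a ∉ r)) +
      (PySem.List.pyRange 0 t).countP (fun a => decide (a ∈ r)) = t.toNat := by
    have := List.length_eq_countP_add_countP (fun a => decide (a ∉ r)) (l := PySem.List.pyRange 0 t)
    have hc : (PySem.List.pyRange 0 t).countP (fun a => decide ¬decide (a ∉ r) = true) =
        (PySem.List.pyRange 0 t).countP (fun a => decide (a ∈ r)) := by
      apply List.countP_congr; intro j _; simp
    rw [hc] at this
    have hlen : (PySem.List.pyRange 0 t).length = t.toNat := by
      have := PySem.List.length_pyRange_one 0 t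
      simpa using this
    omega
  have hcross : (PySem.List.pyRange 0 t).countP (fun a => decide (a ∈ r)) =
      r.countP (fun y => decide (y < t)) := by
    rw [List.countP_eq_length_filter, List.countP_eq_length_filter]
    apply List.Perm.length_eq
    rw [List.perm_ext_iff_of_nodup ((PySem.List.nodup_pyRange_one 0 t).filter _) (hndr.filter _)]
    intro j
    simp only [List.mem_filter, PySem.List.mem_pyRange_one, decide_eq_true_eq]
    constructor
    · rintro ⟨⟨_, hjt⟩, hjr⟩; exact ⟨hjr, hjt⟩
    · rintro ⟨hjr, hjt⟩; exact ⟨⟨hmem j hjr, hjt⟩, hjr⟩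
  have hle : r.countP (fun y => decide (y < t)) ≤ t.toNat := by omega
  rw [h1, h2]
  omega

-- A's loop equals B's fold, for any processing order of the remaining pairs
lemma pvALoop_eq_fold (n : Int) (L : List (Int × Int)) :
    ∀ (r : List Int) (ops cur : Int),
    r.Pairwise (· < ·) →
    (∀ x ∈ r, 0 ≤ x) →
    (cur = 0 ∨ cur ∉ pvCan n r) →
    (∀ p ∈ L, (0 ≤ p.2 ∧ p.2 < n) ∧ p.2 ∉ r) →
    (L.map Prod.snd).Nodup →
    pvALoop L ops cur (pvCan n r) =
      (L.foldl (fun s p => (s.1 + p.2 - (PySem.List.bisectLeft s.2 p.2 : Int) + p.1, pvInsort s.2 p.2))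
        (ops, r)).1 := by
  induction L with
  | nil => intro r ops cur _ _ _ _ _; simp [pvALoop]
  | cons p rest ih =>
    rintro r ops cur hr hrpos hcur hL hnd
    obtain ⟨v, t⟩ := p
    have hhead := hL (v, t) List.mem_cons_self
    have htb : 0 ≤ t ∧ t < n := hhead.1
    have htr : t ∉ r := hhead.2
    have htmem : t ∈ pvCan n r := (mem_pvCan n r t).mpr ⟨htb, htr⟩
    have hcontains : PySem.Set.contains (pvCan n r) t = true :=
      (PySem.Set.contains_iff (pvCan n r) t).mpr htmem
    have hil : PySem.List.sorted (pvCan n r) (fun x => x) = pvCan n r :=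
      PySem.List.sorted_eq_of_perm_of_pairwise_lt _ _ _ (List.Perm.refl _) (pairwise_pvCan n r)
    have hti : PySem.List.index? (pvCan n r) t =
        some ((pvCan n r).countP (fun y => decide (y < t))) :=
      index?_of_pairwise_lt _ _ (pairwise_pvCan n r) htmem
    have hci : (if PySem.Set.contains (pvCan n r) cur then
        (((PySem.List.index? (pvCan n r) cur).getD 0 : Nat) : Int) else 0) = 0 := by
      by_cases hc : PySem.Set.contains (pvCan n r) cur = true
      · have hcmem : cur ∈ pvCan n r := (PySem.Set.contains_iff _ _).mp hc
        have hcur0 : cur = 0 := by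
          rcases hcur with h | h
          · exact h
          · exact absurd hcmem h
        subst hcur0
        rw [index?_of_pairwise_lt _ _ (pairwise_pvCan n r) hcmem]
        have : (pvCan n r).countP (fun y => decide (y < 0)) = 0 := by
          rw [List.countP_eq_zero]
          intro j hj
          have := ((mem_pvCan n r j).mp hj).1.1
          simpa using not_lt.mpr this
        simp [this]
      · rw [if_neg hc]
    -- the removed-set update matches on both sides
    have hdis : PySem.Set.discard (pvCan n r) t = pvCan n (pvInsort r t) := by
      show List.filter _ _ = _
      rw [pvCan, pvCan, List.filter_filter]
      apply List.filter_congr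
      intro j _
      by_cases hjt : j = t
      · subst hjt; simp [mem_pvInsort]
      · simp [mem_pvInsort, hjt]
    have hcnt : (((pvCan n r).countP (fun y => decide (y < t)) : Nat) : Int) =
        t - r.countP (fun y => decide (y < t)) :=
      countP_pvCan n t r hr hrpos htb.1 htb.2
    have hbl : PySem.List.bisectLeft r t = r.countP (fun y => decide (y < t)) :=
      bisectLeft_eq_countP r t hr
    have hndtail : (rest.map Prod.snd).Nodup := (List.nodup_cons.mp hnd).2
    have htnotin : t ∉ rest.map Prod.snd := (List.nodup_cons.mp hnd).1
    simp only [pvALoop, hcontains, Bool.not_true, hil, hti, hci, Option.getD_some,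
      List.foldl_cons]
    have hge : ((((pvCan n r).countP (fun y => decide (y < t)) : Nat) : Int) ≥ 0) := by positivity
    rw [if_pos hge, hdis]
    have hops : ops + ((((pvCan n r).countP (fun y => decide (y < t)) : Nat) : Int) - 0 + v) =
        ops + t - (PySem.List.bisectLeft r t : Int) + v := by
      rw [hcnt, hbl]; ring
    rw [hops]
    apply ih
    · exact pairwise_pvInsort r t hr htr
    · intro x hx
      rcases (mem_pvInsort r t x).mp hx with rfl | hx
      · exact htb.1
      · exact hrpos x hx
    · right
      intro hmem
      exact ((mem_pvCan n (pvInsort r t) t).mp hmem).2 ((mem_pvInsort r t t).mpr (Or.inl rfl))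
    · intro q hq
      obtain ⟨hqb, hqr⟩ := hL q (List.mem_cons_of_mem _ hq)
      refine ⟨hqb, ?_⟩
      intro hmem
      rcases (mem_pvInsort r t q.2).mp hmem with h | h
      · exact htnotin (h ▸ List.mem_map_of_mem hq)
      · exact hqr h
    · exact hndtail

lemma pairs_eq (nums : List Int) :
    ((PySem.List.enumerate nums).filter (fun p => decide (0 < p.2))).map (fun p => (p.2, p.1)) =
    ((PySem.List.pyRange 0 (PySem.List.len nums) 1).filter
        (fun i => decide (0 < PySem.List.pyGetD nums i 0))).map
      (fun i => (PySem.List.pyGetD nums i 0, i)) := by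
  rw [PySem.List.enumerate_eq_map_pyRange nums 0, List.filter_map, List.map_map]
  rfl

-- ===== VERDICT (by name: the statement is the Claim_ definition above) =====
theorem countOperationsToEmptyArraySimulation_spec : Claim_equal_countOperationsToEmptyArraySimulation := by
  intro nums _
  unfold Spec_countOperationsToEmptyArraySimulation
  by_cases hnil : nums = []
  · subst hnil; rfl
  · have hlen0 : ((PySem.List.len nums : Int) == 0) = false := by
      simp [PySem.List.len_eq, hnil]
    simp only [countOperationsToEmptyArraySimulation, countOperationsToEmptyArraySimulation_alt,
      pairs_eq, hlen0, Bool.false_eq_true, if_false]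
    have hof : PySem.Set.ofList (PySem.List.pyRange 0 (PySem.List.len nums) 1) =
        pvCan (PySem.List.len nums) [] := by
      rw [PySem.Set.ofList_eq_self_of_nodup _ (PySem.List.nodup_pyRange_one _ _), pvCan]
      simp
    rw [hof]
    set n : Int := PySem.List.len nums with hn
    set pairs := ((PySem.List.pyRange 0 n 1).filter
        (fun i => decide (0 < PySem.List.pyGetD nums i 0))).map
      (fun i => (PySem.List.pyGetD nums i 0, i)) with hpairs
    apply pvALoop_eq_fold
    · exact List.Pairwise.nil
    · simp
    · left; rfl
    · intro p hp
      have hp' : p ∈ pairs :=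
        (PySem.List.sorted2_perm pairs (fun p => p.1) (fun p => p.2) false).mem_iff.mp hp
      rw [hpairs] at hp'
      simp only [List.mem_map, List.mem_filter, PySem.List.mem_pyRange_one] at hp'
      obtain ⟨i, ⟨⟨h0, hn'⟩, _⟩, rfl⟩ := hp'
      exact ⟨⟨h0, hn'⟩, by simp⟩
    · have hperm :=
        ((PySem.List.sorted2_perm pairs (fun p => p.1) (fun p => p.2) false).map Prod.snd)
      refine hperm.nodup_iff.mpr ?_
      rw [hpairs, List.map_map]
      have hcomp : (Prod.snd ∘ fun i : Int => (PySem.List.pyGetD nums i 0, i)) = id := rfl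
      rw [hcomp, List.map_id]
      exact (PySem.List.nodup_pyRange_one 0 n).filter _
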